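-- pv_equiv track=rewrite | github.com/JavierP284/IA_P2 | Probabilidad/009_Manto_de_Markov.py | manto_markov
-- ===== SOURCE A (Python) =====
-- def manto_markov(nodo, red):
--     """
--     Calcula el Manto de Markov de un nodo en una red bayesiana.
--     El Manto de Markov incluye:
--     - Los padres del nodo
--     - Los hijos del nodo
--     - Los co-padres (otros padres de los hijos del nodo)
--     """
--     padres = set(red[nodo])  # Padres del nodo
--
--     hijos = set()            # Hijos del nodo
--     co_padres = set()        # Otros padres de los hijos (co-padres)
--
--     # Buscar hijos (nodos que tienen como padre al nodo actual)
--     for posible_hijo, padres_posibles in red.items():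
--         if nodo in padres_posibles:
--             hijos.add(posible_hijo)
--
--             # Buscar co-padres (otros padres del hijo)
--             for padre in padres_posibles:
--                 if padre != nodo:
--                     co_padres.add(padre)
--
--     # El manto de Markov es la unión de padres, hijos y co-padres
--     return padres.union(hijos).union(co_padres)
-- ===== SOURCE B (Python) =====
-- def manto_markov(nodo, red):
--     # Divide-and-conquer: recursively split the item list, each half yielding the
--     # raw child-name and co-parent candidate lists; concatenate halves and dedup
--     # once at the end via set().  No set is maintained during the traversal.
--     def recoger(items):
--         if not items:
--             return [], []
--         if len(items) == 1:
--             h, ps = items[0]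
--             if nodo in ps:
--                 return [h], [p for p in ps if p != nodo]
--             return [], []
--         m = len(items) // 2
--         hs1, cs1 = recoger(items[:m])
--         hs2, cs2 = recoger(items[m:])
--         return hs1 + hs2, cs1 + cs2
--     hs, cs = recoger(list(red.items()))
--     return set(red[nodo]) | set(hs) | set(cs)
-- ===== Notes on version B (the rewrite author's own statement) =====
-- stated objective: alternative
-- what changed: Replaces A's single left-to-right scan that maintains mutable hijos/co_padres sets (with an inner per-row set-insertion loop) by a divide-and-conquer recursion that splits the item list, returns raw candidate lists per half, concatenates them, and deduplicates once with set() at the end.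
import Mathlib
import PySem

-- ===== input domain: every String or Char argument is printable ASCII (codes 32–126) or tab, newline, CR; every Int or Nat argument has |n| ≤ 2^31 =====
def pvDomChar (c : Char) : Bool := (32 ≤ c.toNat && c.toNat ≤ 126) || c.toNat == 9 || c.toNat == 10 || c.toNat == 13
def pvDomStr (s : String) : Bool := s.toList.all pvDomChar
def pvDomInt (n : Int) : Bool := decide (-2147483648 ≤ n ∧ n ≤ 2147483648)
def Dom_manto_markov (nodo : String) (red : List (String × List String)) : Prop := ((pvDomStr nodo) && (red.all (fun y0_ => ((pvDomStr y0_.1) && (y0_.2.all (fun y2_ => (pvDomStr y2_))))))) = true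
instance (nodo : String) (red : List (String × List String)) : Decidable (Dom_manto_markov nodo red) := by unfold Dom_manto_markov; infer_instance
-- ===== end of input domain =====

-- B collects raw child/co-parent candidate lists by divide-and-conquer and dedups once at the end; return-value equivalence only.

-- ===== PORT A =====
def manto_markov (nodo : String) (red : List (String × List String)) : List String :=
  let padres : PySem.Set String := PySem.Set.ofList ((PySem.Dict.mk red).getD nodo [])
  let st : PySem.Set String × PySem.Set String :=
    red.foldl (fun (st : PySem.Set String × PySem.Set String) p =>
      if nodo ∈ p.2 then
        (PySem.Set.add st.1 p.1,
         p.2.foldl (fun c padre => if padre ≠ nodo then PySem.Set.add c padre else c) st.2)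
      else st) ([], [])
  PySem.Set.union (PySem.Set.union padres st.1) st.2

-- ===== PORT B =====
-- 'len(items) // 2' is ported as Nat division: a Python list length is nonnegative, where // agrees with Nat division.
def mmRecoger (nodo : String) : List (String × List String) → List String × List String
  | [] => ([], [])
  | [p] => if nodo ∈ p.2 then ([p.1], p.2.filter (fun x => decide (x ≠ nodo))) else ([], [])
  | p :: q :: resto =>
      let items := p :: q :: resto
      let m := items.length / 2
      let r1 := mmRecoger nodo (PySem.List.slice items none (some (m : Int)))
      let r2 := mmRecoger nodo (PySem.List.slice items (some (m : Int)) none)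
      (r1.1 ++ r2.1, r1.2 ++ r2.2)
  termination_by items => items.length
  decreasing_by
    · rw [PySem.List.slice_to_natCast]; simp; omega
    · rw [PySem.List.slice_from_natCast]; simp; omega

def manto_markov_alt (nodo : String) (red : List (String × List String)) : List String :=
  let r := mmRecoger nodo red
  PySem.Set.union
    (PySem.Set.union (PySem.Set.ofList ((PySem.Dict.mk red).getD nodo []))
      (PySem.Set.ofList r.1))
    (PySem.Set.ofList r.2)

-- ===== PRECONDITION & SPEC =====
-- Pre_ requires nodo to be a key of the network (otherwise red[nodo] raises KeyError in A).
def Pre_manto_markov (nodo : String) (red : List (String × List String)) : Prop :=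
  nodo ∈ red.map Prod.fst
instance (nodo : String) (red : List (String × List String)) : Decidable (Pre_manto_markov nodo red) := by unfold Pre_manto_markov; infer_instance
def pvWitness_manto_markov : String × (List (String × List String)) :=
  ("A", [("A", []), ("B", ["A", "C"]), ("C", []), ("D", ["B"])])
def Spec_manto_markov (nodo : String) (red : List (String × List String)) (out : List String) : Prop := out = manto_markov_alt nodo red
instance (nodo : String) (red : List (String × List String)) (out : List String) : Decidable (Spec_manto_markov nodo red out) := by unfold Spec_manto_markov; infer_instance

-- ===== CLAIM (what is proved, stated in full; the proofs are below) =====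
def Claim_equal_manto_markov : Prop := ∀ (nodo : String) (red : List (String × List String)), Dom_manto_markov nodo red → Pre_manto_markov nodo red → Spec_manto_markov nodo red (manto_markov nodo red)

-- ===== LEMMAS AND PROOFS =====

-- closed forms of B's recursion: child names and co-parent candidates of the filtered rows
def pvHs (nodo : String) (l : List (String × List String)) : List String :=
  (l.filter (fun p => decide (nodo ∈ p.2))).map Prod.fst
def pvCs (nodo : String) (l : List (String × List String)) : List String :=
  (l.filter (fun p => decide (nodo ∈ p.2))).flatMap (fun p => p.2.filter (fun x => decide (x ≠ nodo)))

theorem pvHs_append (nodo : String) (a b : List (String × List String)) :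
    pvHs nodo (a ++ b) = pvHs nodo a ++ pvHs nodo b := by
  simp [pvHs, List.filter_append]

theorem pvCs_append (nodo : String) (a b : List (String × List String)) :
    pvCs nodo (a ++ b) = pvCs nodo a ++ pvCs nodo b := by
  simp [pvCs, List.filter_append]

-- B's divide-and-conquer computes exactly those closed forms
theorem mmRecoger_eq (nodo : String) (items : List (String × List String)) :
    mmRecoger nodo items = (pvHs nodo items, pvCs nodo items) := by
  induction items using mmRecoger.induct nodo
  case case1 => simp [mmRecoger, pvHs, pvCs]
  case case2 p hp => simp [mmRecoger, pvHs, pvCs, hp]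
  case case3 p hp => simp [mmRecoger, pvHs, pvCs, hp]
  case case4 a b rest ihl ihr =>
      rw [PySem.List.slice_to_natCast] at ihl
      rw [PySem.List.slice_from_natCast] at ihr
      simp only [rest, b] at ihl ihr
      rw [mmRecoger]
      simp only [PySem.List.slice_to_natCast, PySem.List.slice_from_natCast, ihl, ihr]
      rw [← pvHs_append nodo _ _, ← pvCs_append nodo _ _, List.take_append_drop]

-- A's pair fold splits into two folds over the filtered children rows
theorem pv_pair_fold (nodo : String) (red : List (String × List String))
    (s : PySem.Set String × PySem.Set String) :
    red.foldl (fun (st : PySem.Set String × PySem.Set String) p =>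
      if nodo ∈ p.2 then
        (PySem.Set.add st.1 p.1,
         p.2.foldl (fun c padre => if padre ≠ nodo then PySem.Set.add c padre else c) st.2)
      else st) s
    = ((red.filter (fun p => decide (nodo ∈ p.2))).foldl (fun h p => PySem.Set.add h p.1) s.1,
       (red.filter (fun p => decide (nodo ∈ p.2))).foldl
         (fun c p => p.2.foldl (fun c padre => if padre ≠ nodo then PySem.Set.add c padre else c) c) s.2) := by
  induction red generalizing s with
  | nil => rfl
  | cons p red ih =>
      by_cases hp : nodo ∈ p.2
      · simp only [List.foldl_cons, List.filter_cons, hp, decide_true, if_true]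
        exact ih _
      · simp only [List.foldl_cons, List.filter_cons, hp, decide_false, if_false]
        exact ih _

-- A's inner loop over one parent list = fold of add over the filtered list
theorem pv_inner_filter (nodo : String) (ps : List String) (c : PySem.Set String) :
    ps.foldl (fun c padre => if padre ≠ nodo then PySem.Set.add c padre else c) c
      = (ps.filter (fun x => decide (x ≠ nodo))).foldl PySem.Set.add c := by
  induction ps generalizing c with
  | nil => rfl
  | cons x ps ih =>
      simp only [List.foldl_cons, List.filter_cons]
      by_cases hx : x = nodo
      · rw [if_neg (by simp [hx]), if_neg (by simp [hx])]
        exact ih c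
      · rw [if_pos hx, if_pos (by simp [hx])]
        exact ih _

-- folding add over a flatMap = the nested fold
theorem pv_foldl_flatMap {α β : Type} (f : α → List β) (l : List α)
    (c : PySem.Set β) [BEq β] :
    (l.flatMap f).foldl PySem.Set.add c = l.foldl (fun c p => (f p).foldl PySem.Set.add c) c := by
  induction l generalizing c with
  | nil => rfl
  | cons x l ih => simp [List.flatMap_cons, List.foldl_append, ih]

theorem manto_markov_spec : Claim_equal_manto_markov := by
  intro nodo red _hdom _hpre
  unfold Spec_manto_markov
  simp only [manto_markov, manto_markov_alt, pv_pair_fold, mmRecoger_eq]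
  congr 1
  · congr 1
    rw [PySem.Set.ofList_eq_foldl, pvHs, List.foldl_map]
  · rw [PySem.Set.ofList_eq_foldl, pvCs, pv_foldl_flatMap]
    simp only [pv_inner_filter]
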